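-- pv_equiv track=rewrite | github.com/Ultraviolet-Ninja/MyCompProgExperience | src/kattis/jazz/lab5/solitaire.py | move_possible
-- ===== SOURCE A (Python) =====
-- def move_possible(board):
--     for idx, letter in enumerate(board):
--         if letter == 'o':
--             if idx - 2 >= 0 and board[idx - 1] == 'o' and board[idx - 2] == '-':
--                 return True
--             if idx + 2 <= (len(board) - 1) and board[idx + 1] == 'o' and board[idx + 2] == '-':
--                 return True
--     # if no pieces can move, no moves are possible
--     return False
-- ===== SOURCE B (Python) =====
-- def move_possible(board):
--     # A move exists iff the board contains a right jump "oo-" or a left jump "-oo".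
--     return 'oo-' in board or '-oo' in board
-- ===== Notes on version B (the rewrite author's own statement) =====
-- stated objective: idiomatic
-- what changed: Replaced the per-peg neighbour-probing index loop with two substring containment tests ('oo-' in board or '-oo' in board).
import Mathlib
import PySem

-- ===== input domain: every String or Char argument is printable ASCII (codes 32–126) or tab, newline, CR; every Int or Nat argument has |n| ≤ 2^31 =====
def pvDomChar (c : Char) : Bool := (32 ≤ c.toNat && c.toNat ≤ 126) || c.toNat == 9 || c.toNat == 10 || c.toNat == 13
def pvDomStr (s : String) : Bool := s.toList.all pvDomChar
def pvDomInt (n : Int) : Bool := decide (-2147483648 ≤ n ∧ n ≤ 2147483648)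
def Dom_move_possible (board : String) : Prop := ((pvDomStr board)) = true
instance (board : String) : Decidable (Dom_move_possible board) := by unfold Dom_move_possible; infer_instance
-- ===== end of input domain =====

-- B replaces A's per-peg neighbour-probing index loop with two substring tests ('oo-' in board or '-oo' in board); idiomatic, same cost.

-- ===== PORT A =====
-- A's indexing board[idx±1], board[idx±2] is always guarded in range, so pyGetD with a
-- dummy default ' ' is exact (Python never raises here).
def moveLoop (cs : List Char) : List (Int × Char) → Bool
  | [] => false
  | (idx, letter) :: rest =>
    if letter = 'o' then
      if idx - 2 ≥ 0 ∧ PySem.List.pyGetD cs (idx - 1) ' ' = 'o' ∧ PySem.List.pyGetD cs (idx - 2) ' ' = '-' then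
        true
      else if idx + 2 ≤ (cs.length : Int) - 1 ∧ PySem.List.pyGetD cs (idx + 1) ' ' = 'o' ∧ PySem.List.pyGetD cs (idx + 2) ' ' = '-' then
        true
      else moveLoop cs rest
    else moveLoop cs rest

def move_possible (board : String) : Bool :=
  moveLoop board.toList (PySem.List.enumerate board.toList 0)

-- ===== PORT B =====
def move_possible_alt (board : String) : Bool :=
  PySem.Str.isIn "oo-" board || PySem.Str.isIn "-oo" board

-- ===== PRECONDITION & SPEC =====
def Spec_move_possible (board : String) (out : Bool) : Prop := out = move_possible_alt board
instance (board : String) (out : Bool) : Decidable (Spec_move_possible board out) := by unfold Spec_move_possible; infer_instance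

-- ===== CLAIM (what is proved, stated in full; the proofs are below) =====
def Claim_equal_move_possible : Prop := ∀ (board : String), Dom_move_possible board → Spec_move_possible board (move_possible board)

-- ===== LEMMAS AND PROOFS =====

-- a peg at position j can jump left (into '-' two to the left) or right
def LeftHit (cs : List Char) (j : Nat) : Prop :=
  2 ≤ j ∧ cs[j-1]? = some 'o' ∧ cs[j-2]? = some '-'
def RightHit (cs : List Char) (j : Nat) : Prop :=
  cs[j+1]? = some 'o' ∧ cs[j+2]? = some '-'
def Hit (cs : List Char) (j : Nat) : Prop :=
  cs[j]? = some 'o' ∧ (LeftHit cs j ∨ RightHit cs j)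

lemma prefix3_iff (a b c : Char) (l : List Char) :
    ([a, b, c] <+: l) ↔ (l[0]? = some a ∧ l[1]? = some b ∧ l[2]? = some c) := by
  match l with
  | [] => simp
  | [x] => simp
  | [x, y] => simp [List.prefix_iff_eq_take]
  | x :: y :: z :: t => simp [List.cons_prefix_cons, eq_comm]

lemma pat_at_iff (a b c : Char) (cs : List Char) (j : Nat) :
    ([a, b, c] <+: cs.drop j) ↔ (cs[j]? = some a ∧ cs[j+1]? = some b ∧ cs[j+2]? = some c) := by
  rw [prefix3_iff]
  simp [List.getElem?_drop]

lemma exists_pat_iff_hit (cs : List Char) :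
    (∃ j : Nat, (['o','o','-'] <+: cs.drop j) ∨ (['-','o','o'] <+: cs.drop j)) ↔ ∃ j, Hit cs j := by
  constructor
  · rintro ⟨j, h | h⟩
    · rw [pat_at_iff] at h
      exact ⟨j, h.1, Or.inr ⟨h.2.1, h.2.2⟩⟩
    · rw [pat_at_iff] at h
      refine ⟨j + 2, h.2.2, Or.inl ⟨by omega, ?_, ?_⟩⟩
      · simpa using h.2.1
      · simpa using h.1
  · rintro ⟨j, ho, hL | hR⟩
    · refine ⟨j - 2, Or.inr ?_⟩
      rw [pat_at_iff]
      obtain ⟨h2, h1, h0⟩ := hL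
      refine ⟨h0, ?_, ?_⟩
      · have : j - 2 + 1 = j - 1 := by omega
        rw [this]; exact h1
      · have : j - 2 + 2 = j := by omega
        rw [this]; exact ho
    · exact ⟨j, Or.inl (by rw [pat_at_iff]; exact ⟨ho, hR.1, hR.2⟩)⟩

lemma moveLoop_cons (cs : List Char) (idx : Int) (letter : Char) (rest : List (Int × Char)) :
    moveLoop cs ((idx, letter) :: rest) =
      if letter = 'o' then
        if idx - 2 ≥ 0 ∧ PySem.List.pyGetD cs (idx - 1) ' ' = 'o' ∧ PySem.List.pyGetD cs (idx - 2) ' ' = '-' then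
          true
        else if idx + 2 ≤ (cs.length : Int) - 1 ∧ PySem.List.pyGetD cs (idx + 1) ' ' = 'o' ∧ PySem.List.pyGetD cs (idx + 2) ' ' = '-' then
          true
        else moveLoop cs rest
      else moveLoop cs rest := rfl

lemma pyGetD_some_iff (cs : List Char) (m : Nat) (hm : m < cs.length) (d c : Char) :
    PySem.List.pyGetD cs (m : Int) d = c ↔ cs[m]? = some c := by
  rw [PySem.List.pyGetD_natCast, List.getD_eq_getElem?_getD, List.getElem?_eq_getElem hm]
  simp

lemma moveLoop_iff (cs : List Char) (l : List Char) (k : Nat) (hdrop : cs.drop k = l) :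
    moveLoop cs (PySem.List.enumerate l (k : Int)) = true ↔ ∃ j, k ≤ j ∧ Hit cs j := by
  induction l generalizing k with
  | nil =>
    simp only [PySem.List.enumerate_nil, moveLoop]
    constructor
    · intro h; cases h
    · rintro ⟨j, hkj, ho, _⟩
      have hlen : cs.length ≤ k := by
        have := List.drop_eq_nil_iff.mp hdrop
        omega
      have : j < cs.length := by
        by_contra hc
        rw [List.getElem?_eq_none (by omega)] at ho
        cases ho
      omega
  | cons a l' ih =>
    have hk : k < cs.length := by
      by_contra hc
      rw [List.drop_eq_nil_iff.mpr (by omega)] at hdrop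
      cases hdrop
    have ha : cs[k]? = some a := by
      have := congrArg (fun t => t[0]?) hdrop
      simpa [List.getElem?_drop] using this
    have hdrop' : cs.drop (k + 1) = l' := by
      have := congrArg List.tail hdrop
      simpa [List.tail_drop] using this
    have hcast : ((k : Int) + 1) = ((k + 1 : Nat) : Int) := by push_cast; ring
    rw [PySem.List.enumerate_cons, hcast, moveLoop_cons]
    have ihk := ih (k + 1) hdrop'
    by_cases hao : a = 'o'
    · rw [if_pos hao]
      by_cases hLc : ((k : Int) - 2 ≥ 0 ∧ PySem.List.pyGetD cs ((k : Int) - 1) ' ' = 'o' ∧ PySem.List.pyGetD cs ((k : Int) - 2) ' ' = '-')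
      · rw [if_pos hLc]
        constructor
        · intro _
          obtain ⟨h2, h1, h0⟩ := hLc
          have hk2 : 2 ≤ k := by omega
          have e1 : (k : Int) - 1 = ((k - 1 : Nat) : Int) := by omega
          have e2 : (k : Int) - 2 = ((k - 2 : Nat) : Int) := by omega
          rw [e1, pyGetD_some_iff cs (k-1) (by omega)] at h1
          rw [e2, pyGetD_some_iff cs (k-2) (by omega)] at h0
          exact ⟨k, le_refl _, by rw [ha, hao], Or.inl ⟨hk2, h1, h0⟩⟩
        · intro _; rfl
      · rw [if_neg hLc]
        by_cases hRc : ((k : Int) + 2 ≤ (cs.length : Int) - 1 ∧ PySem.List.pyGetD cs ((k : Int) + 1) ' ' = 'o' ∧ PySem.List.pyGetD cs ((k : Int) + 2) ' ' = '-')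
        · rw [if_pos hRc]
          constructor
          · intro _
            obtain ⟨hb, h1, h2⟩ := hRc
            have e1 : (k : Int) + 1 = ((k + 1 : Nat) : Int) := by omega
            have e2 : (k : Int) + 2 = ((k + 2 : Nat) : Int) := by omega
            rw [e1, pyGetD_some_iff cs (k+1) (by omega)] at h1
            rw [e2, pyGetD_some_iff cs (k+2) (by omega)] at h2
            exact ⟨k, le_refl _, by rw [ha, hao], Or.inr ⟨h1, h2⟩⟩
          · intro _; rfl
        · rw [if_neg hRc, ihk]
          constructor
          · rintro ⟨j, hj, hhit⟩
            exact ⟨j, by omega, hhit⟩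
          · rintro ⟨j, hj, hhit⟩
            rcases Nat.eq_or_lt_of_le hj with rfl | hlt
            · exfalso
              obtain ⟨_, hL | hR⟩ := hhit
              · obtain ⟨h2, h1, h0⟩ := hL
                apply hLc
                have e1 : (k : Int) - 1 = ((k - 1 : Nat) : Int) := by omega
                have e2 : (k : Int) - 2 = ((k - 2 : Nat) : Int) := by omega
                refine ⟨by omega, ?_, ?_⟩
                · rw [e1, pyGetD_some_iff cs (k-1) (by omega)]; exact h1
                · rw [e2, pyGetD_some_iff cs (k-2) (by omega)]; exact h0
              · obtain ⟨h1, h2⟩ := hR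
                apply hRc
                have j2 : k + 2 < cs.length := by
                  by_contra hc
                  rw [List.getElem?_eq_none (by omega)] at h2
                  cases h2
                have e1 : (k : Int) + 1 = ((k + 1 : Nat) : Int) := by omega
                have e2 : (k : Int) + 2 = ((k + 2 : Nat) : Int) := by omega
                refine ⟨by omega, ?_, ?_⟩
                · rw [e1, pyGetD_some_iff cs (k+1) (by omega)]; exact h1
                · rw [e2, pyGetD_some_iff cs (k+2) (by omega)]; exact h2
            · exact ⟨j, by omega, hhit⟩
    · rw [if_neg hao, ihk]
      constructor
      · rintro ⟨j, hj, hhit⟩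
        exact ⟨j, by omega, hhit⟩
      · rintro ⟨j, hj, hhit⟩
        rcases Nat.eq_or_lt_of_le hj with rfl | hlt
        · exfalso
          obtain ⟨ho, _⟩ := hhit
          rw [ha] at ho
          exact hao (by simpa using ho)
        · exact ⟨j, by omega, hhit⟩

lemma alt_iff (board : String) :
    move_possible_alt board = true ↔ ∃ j : Nat,
      (['o','o','-'] <+: board.toList.drop j) ∨ (['-','o','o'] <+: board.toList.drop j) := by
  unfold move_possible_alt
  rw [Bool.or_eq_true]
  have t1 : ("oo-" : String).toList = ['o','o','-'] := rfl
  have t2 : ("-oo" : String).toList = ['-','o','o'] := rfl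
  rw [show PySem.Str.isIn "oo-" board = PySem.Chars.isIn ['o','o','-'] board.toList by
        simp [PySem.Str.isIn_eq, t1],
      show PySem.Str.isIn "-oo" board = PySem.Chars.isIn ['-','o','o'] board.toList by
        simp [PySem.Str.isIn_eq, t2],
      ← PySem.Chars.exists_prefix_drop_iff_isIn, ← PySem.Chars.exists_prefix_drop_iff_isIn]
  constructor
  · rintro (⟨j, h⟩ | ⟨j, h⟩)
    · exact ⟨j, Or.inl h⟩
    · exact ⟨j, Or.inr h⟩
  · rintro ⟨j, h | h⟩
    · exact Or.inl ⟨j, h⟩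
    · exact Or.inr ⟨j, h⟩

-- ===== VERDICT (by name: the statement is the Claim_ definition above) =====
theorem move_possible_spec : Claim_equal_move_possible := by
  intro board _
  unfold Spec_move_possible
  have hA : move_possible board = true ↔ ∃ j, Hit board.toList j := by
    unfold move_possible
    rw [show (0 : Int) = ((0 : Nat) : Int) from rfl,
      moveLoop_iff board.toList board.toList 0 (by simp)]
    constructor
    · rintro ⟨j, _, h⟩; exact ⟨j, h⟩
    · rintro ⟨j, h⟩; exact ⟨j, Nat.zero_le _, h⟩
  have hB : move_possible_alt board = true ↔ ∃ j, Hit board.toList j :=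
    (alt_iff board).trans (exists_pat_iff_hit board.toList)
  have h1 := hA.trans hB.symm
  cases hmb : move_possible_alt board with
  | true => exact h1.mpr hmb
  | false =>
    refine Bool.eq_false_iff.mpr (fun h => ?_)
    rw [h1.mp h] at hmb
    cases hmb
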